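-- pv_equiv track=rewrite | github.com/elliotjames-paschal/bellwether-platform | packages/pipelines/semantic_match/verify.py | _check_disjoint_mismatch
-- ===== SOURCE A (Python) =====
-- from typing import Any, Dict, List, Optional, Literal, Set, Tuple
--
-- DISJOINT_GROUPS: List[Set[str]] = [
--     {"trump", "biden", "desantis", "haley", "kennedy"},
--     {"republican", "democrat", "libertarian", "green"},
--     {"lakers", "celtics", "warriors", "suns", "knicks", "heat", "bulls", "bucks", "nuggets", "clippers"},
--     {"chiefs", "49ers", "ravens", "lions", "eagles", "cowboys"},
--     {"michigan", "georgia", "florida", "ohio", "pennsylvania", "wisconsin", "arizona", "nevada", "north_carolina", "national"},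
--     {"market_cap", "tvl", "volume", "price"},
-- ]
--
-- def _check_disjoint_mismatch(ent_a: Set[str], ent_b: Set[str]) -> bool:
--     """Return True if any disjoint group has elements from both sides that are DIFFERENT."""
--     for i, group in enumerate(DISJOINT_GROUPS):
--         if i == 4:  # Skip regions; handled separately
--             continue
--         in_a = ent_a.intersection(group)
--         in_b = ent_b.intersection(group)
--         if in_a and in_b and in_a != in_b:
--             return True
--     return False
-- ===== SOURCE B (Python) =====
-- from typing import Any, Dict, List, Optional, Literal, Set, Tuple
--
-- DISJOINT_GROUPS: List[Set[str]] = [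
--     {"trump", "biden", "desantis", "haley", "kennedy"},
--     {"republican", "democrat", "libertarian", "green"},
--     {"lakers", "celtics", "warriors", "suns", "knicks", "heat", "bulls", "bucks", "nuggets", "clippers"},
--     {"chiefs", "49ers", "ravens", "lions", "eagles", "cowboys"},
--     {"michigan", "georgia", "florida", "ohio", "pennsylvania", "wisconsin", "arizona", "nevada", "north_carolina", "national"},
--     {"market_cap", "tvl", "volume", "price"},
-- ]
--
-- # Inverted index: entity -> index of its disjoint group (group 4, regions, is skipped).
-- _GROUP_INDEX: Dict[str, int] = {}
-- for _i, _group in enumerate(DISJOINT_GROUPS):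
--     if _i != 4:
--         for _e in _group:
--             _GROUP_INDEX[_e] = _i
--
-- def _check_disjoint_mismatch(ent_a: Set[str], ent_b: Set[str]) -> bool:
--     """Return True if any disjoint group has elements from both sides that are DIFFERENT."""
--     a_by = [set() for _ in range(6)]
--     b_by = [set() for _ in range(6)]
--     for e in ent_a:
--         i = _GROUP_INDEX.get(e)
--         if i is not None:
--             a_by[i].add(e)
--     for e in ent_b:
--         i = _GROUP_INDEX.get(e)
--         if i is not None:
--             b_by[i].add(e)
--     for i in (0, 1, 2, 3, 5):
--         if a_by[i] and b_by[i] and a_by[i] != b_by[i]: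
--             return True
--     return False
-- ===== Notes on version B (the rewrite author's own statement) =====
-- stated objective: alternative
-- what changed: Replaces the per-group scan (set intersection of each side with each of the five checked groups) by an inverted element-to-group-index table built once from DISJOINT_GROUPS (skipping group 4), a single classification pass over each input set into per-group buckets, and a final comparison of the buckets.
import Mathlib
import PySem

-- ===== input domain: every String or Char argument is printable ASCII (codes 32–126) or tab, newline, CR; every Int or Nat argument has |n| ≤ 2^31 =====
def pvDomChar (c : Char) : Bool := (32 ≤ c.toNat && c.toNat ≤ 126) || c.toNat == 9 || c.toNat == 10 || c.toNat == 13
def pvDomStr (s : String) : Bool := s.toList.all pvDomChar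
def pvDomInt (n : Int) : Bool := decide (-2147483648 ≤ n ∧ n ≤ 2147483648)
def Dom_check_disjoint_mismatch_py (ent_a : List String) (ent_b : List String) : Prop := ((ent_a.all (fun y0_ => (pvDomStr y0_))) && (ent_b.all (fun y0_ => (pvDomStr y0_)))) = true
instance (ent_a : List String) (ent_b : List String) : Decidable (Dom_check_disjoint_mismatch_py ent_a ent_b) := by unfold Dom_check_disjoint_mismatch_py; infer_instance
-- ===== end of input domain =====

-- B replaces A's six per-group intersection scans by a one-pass classification of each
-- entity through an inverted element→group-index table (objective: alternative decomposition).

-- ===== PORT A =====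
-- DISJOINT_GROUPS (set literals of distinct strings; order of the literal as written)
def pvG0 : List String := ["trump","biden","desantis","haley","kennedy"]
def pvG1 : List String := ["republican","democrat","libertarian","green"]
def pvG2 : List String := ["lakers","celtics","warriors","suns","knicks","heat","bulls","bucks","nuggets","clippers"]
def pvG3 : List String := ["chiefs","49ers","ravens","lions","eagles","cowboys"]
def pvG4 : List String := ["michigan","georgia","florida","ohio","pennsylvania","wisconsin","arizona","nevada","north_carolina","national"]
def pvG5 : List String := ["market_cap","tvl","volume","price"]
def pvGroups : List (List String) := [pvG0, pvG1, pvG2, pvG3, pvG4, pvG5]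

-- the 'for i, group in enumerate(DISJOINT_GROUPS)' loop with its early 'return True'
def pvCheckA : List (Int × List String) → List String → List String → Bool
  | [], _, _ => false
  | (i, g) :: rest, ea, eb =>
    if i == 4 then pvCheckA rest ea eb
    else
      let in_a := PySem.Set.inter ea g
      let in_b := PySem.Set.inter eb g
      if in_a ≠ [] ∧ in_b ≠ [] ∧ PySem.Set.equal in_a in_b = false then true
      else pvCheckA rest ea eb

def check_disjoint_mismatch_py (ent_a : List String) (ent_b : List String) : Bool :=
  pvCheckA (PySem.List.enumerate pvGroups) ent_a ent_b

-- ===== PORT B =====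
-- module-level inverted index _GROUP_INDEX: entity -> group index, group 4 skipped
def pvGroupIndex : PySem.Dict String Int :=
  (PySem.List.enumerate pvGroups).foldl
    (fun d p => if p.1 == 4 then d else p.2.foldl (fun d e => d.insert e p.1) d)
    PySem.Dict.empty

-- one classification pass: a_by / b_by, six buckets, bucket i collects the side's
-- entities whose table index is i
def pvClassify (ents : List String) : List (PySem.Set String) :=
  ents.foldl
    (fun bs e =>
      match pvGroupIndex.get? e with
      | some i => bs.set i.toNat (PySem.Set.add (bs.getD i.toNat []) e)
      | none => bs)
    (List.replicate 6 [])

def check_disjoint_mismatch_py_alt (ent_a : List String) (ent_b : List String) : Bool :=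
  let a_by := pvClassify ent_a
  let b_by := pvClassify ent_b
  ([0, 1, 2, 3, 5] : List Nat).any (fun i =>
    decide ((a_by.getD i []) ≠ [] ∧ (b_by.getD i []) ≠ [] ∧
            PySem.Set.equal (a_by.getD i []) (b_by.getD i []) = false))

-- ===== PRECONDITION & SPEC =====
def Spec_check_disjoint_mismatch_py (ent_a : List String) (ent_b : List String) (out : Bool) : Prop := out = check_disjoint_mismatch_py_alt ent_a ent_b
instance (ent_a : List String) (ent_b : List String) (out : Bool) : Decidable (Spec_check_disjoint_mismatch_py ent_a ent_b out) := by unfold Spec_check_disjoint_mismatch_py; infer_instance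

-- ===== CLAIM (what is proved, stated in full; the proofs are below) =====
def Claim_equal_check_disjoint_mismatch_py : Prop := ∀ (ent_a : List String) (ent_b : List String), Dom_check_disjoint_mismatch_py ent_a ent_b → Spec_check_disjoint_mismatch_py ent_a ent_b (check_disjoint_mismatch_py ent_a ent_b)

-- ===== LEMMAS AND PROOFS =====

-- the inverted index, written out
set_option maxHeartbeats 2000000 in
theorem pvGroupIndex_lit : pvGroupIndex = PySem.Dict.mk [("trump", 0),("biden", 0),("desantis", 0),("haley", 0),("kennedy", 0),("republican", 1),("democrat", 1),("libertarian", 1),("green", 1),("lakers", 2),("celtics", 2),("warriors", 2),("suns", 2),("knicks", 2),("heat", 2),("bulls", 2),("bucks", 2),("nuggets", 2),("clippers", 2),("chiefs", 3),("49ers", 3),("ravens", 3),("lions", 3),("eagles", 3),("cowboys", 3),("market_cap", 5),("tvl", 5),("volume", 5),("price", 5)] := by decide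

set_option maxHeartbeats 2000000 in
theorem pvGroupIndex_nodup : pvGroupIndex.keys.Nodup := by rw [pvGroupIndex_lit]; decide

-- a table hit always lands in one of the five handled buckets
theorem pvIdx_values (e : String) (j : Int) (h : pvGroupIndex.get? e = some j) :
    j = 0 ∨ j = 1 ∨ j = 2 ∨ j = 3 ∨ j = 5 := by
  rw [PySem.Dict.get?_eq_some_iff_mem_items _ _ _ pvGroupIndex_nodup, pvGroupIndex_lit] at h
  simp at h
  rcases h with h|h|h|h|h <;> omega

-- table lookup ↔ membership in the corresponding group
theorem pvIdx0 (e : String) : pvGroupIndex.get? e = some 0 ↔ e ∈ pvG0 := by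
  rw [PySem.Dict.get?_eq_some_iff_mem_items _ _ _ pvGroupIndex_nodup, pvGroupIndex_lit]
  simp [pvG0]
theorem pvIdx1 (e : String) : pvGroupIndex.get? e = some 1 ↔ e ∈ pvG1 := by
  rw [PySem.Dict.get?_eq_some_iff_mem_items _ _ _ pvGroupIndex_nodup, pvGroupIndex_lit]
  simp [pvG1]
theorem pvIdx2 (e : String) : pvGroupIndex.get? e = some 2 ↔ e ∈ pvG2 := by
  rw [PySem.Dict.get?_eq_some_iff_mem_items _ _ _ pvGroupIndex_nodup, pvGroupIndex_lit]
  simp [pvG2]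
theorem pvIdx3 (e : String) : pvGroupIndex.get? e = some 3 ↔ e ∈ pvG3 := by
  rw [PySem.Dict.get?_eq_some_iff_mem_items _ _ _ pvGroupIndex_nodup, pvGroupIndex_lit]
  simp [pvG3]
theorem pvIdx5 (e : String) : pvGroupIndex.get? e = some 5 ↔ e ∈ pvG5 := by
  rw [PySem.Dict.get?_eq_some_iff_mem_items _ _ _ pvGroupIndex_nodup, pvGroupIndex_lit]
  simp [pvG5]

-- membership in bucket i after the fold
theorem pvClassify_fold_mem (ents : List String) (bs : List (PySem.Set String))
    (hlen : bs.length = 6) (i : Nat) (hi : i < 6) (x : String) :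
    x ∈ ((ents.foldl
      (fun bs e =>
        match pvGroupIndex.get? e with
        | some i => bs.set i.toNat (PySem.Set.add (bs.getD i.toNat []) e)
        | none => bs) bs).getD i []) ↔
    x ∈ bs.getD i [] ∨ (x ∈ ents ∧ pvGroupIndex.get? x = some (i : Int)) := by
  induction ents generalizing bs with
  | nil => simp
  | cons e rest ih =>
    simp only [List.foldl_cons]
    cases hj : pvGroupIndex.get? e with
    | none =>
      rw [ih bs hlen]
      constructor
      · rintro (h | ⟨hm, hg⟩)
        · exact Or.inl h
        · exact Or.inr ⟨List.mem_cons_of_mem _ hm, hg⟩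
      · rintro (h | ⟨hm, hg⟩)
        · exact Or.inl h
        · rcases List.mem_cons.mp hm with rfl | hm'
          · rw [hg] at hj; exact absurd hj (by simp)
          · exact Or.inr ⟨hm', hg⟩
    | some j =>
      have hjv := pvIdx_values e j hj
      have hj0 : 0 ≤ j := by rcases hjv with rfl|rfl|rfl|rfl|rfl <;> norm_num
      have hjlt : j.toNat < 6 := by rcases hjv with rfl|rfl|rfl|rfl|rfl <;> norm_num
      rw [ih _ (by rw [List.length_set]; exact hlen)]
      have hset : (bs.set j.toNat (PySem.Set.add (bs.getD j.toNat []) e)).getD i [] =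
          if j.toNat = i then PySem.Set.add (bs.getD j.toNat []) e else bs.getD i [] := by
        rcases eq_or_ne j.toNat i with heq | hne
        · rw [if_pos heq, ← heq]
          have : j.toNat < bs.length := by omega
          simp [List.getD_eq_getElem?_getD, this]
        · rw [if_neg hne]
          simp [List.getD_eq_getElem?_getD, hne]
      rw [hset]
      rcases eq_or_ne j.toNat i with heq | hne
      · rw [if_pos heq, heq]
        have hij : (i : Int) = j := by omega
        rw [PySem.Set.mem_add]
        constructor
        · rintro ((h | rfl) | ⟨hm, hg⟩)
          · exact Or.inl h
          · exact Or.inr ⟨List.mem_cons_self, by rw [hij]; exact hj⟩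
          · exact Or.inr ⟨List.mem_cons_of_mem _ hm, hg⟩
        · rintro (h | ⟨hm, hg⟩)
          · exact Or.inl (Or.inl h)
          · rcases List.mem_cons.mp hm with rfl | hm'
            · exact Or.inl (Or.inr rfl)
            · exact Or.inr ⟨hm', hg⟩
      · rw [if_neg hne]
        constructor
        · rintro (h | ⟨hm, hg⟩)
          · exact Or.inl h
          · exact Or.inr ⟨List.mem_cons_of_mem _ hm, hg⟩
        · rintro (h | ⟨hm, hg⟩)
          · exact Or.inl h
          · rcases List.mem_cons.mp hm with rfl | hm'
            · rw [hg] at hj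
              simp only [Option.some.injEq] at hj
              omega
            · exact Or.inr ⟨hm', hg⟩

-- bucket i of the classification has exactly the members of ents ∩ group i
theorem pvClassify_mem (ents : List String) (i : Nat) (hi : i < 6) (x : String) :
    x ∈ (pvClassify ents).getD i [] ↔ (x ∈ ents ∧ pvGroupIndex.get? x = some (i : Int)) := by
  unfold pvClassify
  rw [pvClassify_fold_mem ents (List.replicate 6 []) (by simp) i hi]
  simp only [List.getD_eq_getElem?_getD]
  interval_cases i <;> simp

theorem pvBucket_vs_inter (ents : List String) (i : Nat) (hi : i < 6) (g : List String)
    (hg : ∀ e : String, pvGroupIndex.get? e = some (i : Int) ↔ e ∈ g) (x : String) :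
    x ∈ (pvClassify ents).getD i [] ↔ x ∈ PySem.Set.inter ents g := by
  rw [pvClassify_mem ents i hi, PySem.Set.mem_inter, hg]

-- the per-group Boolean condition only depends on the members of the two sets
theorem pvCond_congr (s s' t t' : List String)
    (hs : ∀ x, x ∈ s ↔ x ∈ s') (ht : ∀ x, x ∈ t ↔ x ∈ t') :
    decide (s ≠ [] ∧ t ≠ [] ∧ PySem.Set.equal s t = false)
      = decide (s' ≠ [] ∧ t' ≠ [] ∧ PySem.Set.equal s' t' = false) := by
  apply decide_eq_decide.mpr
  have h1 : s ≠ [] ↔ s' ≠ [] := by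
    simp only [← List.isEmpty_eq_false_iff, List.isEmpty_eq_false_iff_exists_mem]
    exact ⟨fun ⟨x, hx⟩ => ⟨x, (hs x).mp hx⟩, fun ⟨x, hx⟩ => ⟨x, (hs x).mpr hx⟩⟩
  have h2 : t ≠ [] ↔ t' ≠ [] := by
    simp only [← List.isEmpty_eq_false_iff, List.isEmpty_eq_false_iff_exists_mem]
    exact ⟨fun ⟨x, hx⟩ => ⟨x, (ht x).mp hx⟩, fun ⟨x, hx⟩ => ⟨x, (ht x).mpr hx⟩⟩
  have h3 : PySem.Set.equal s t = false ↔ PySem.Set.equal s' t' = false := by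
    rw [← Bool.not_eq_true, ← Bool.not_eq_true, not_iff_not,
        PySem.Set.equal_iff, PySem.Set.equal_iff]
    constructor
    · intro h x; rw [← hs x, ← ht x]; exact h x
    · intro h x; rw [hs x, ht x]; exact h x
  rw [h1, h2, h3]

theorem pvIfOr (p : Prop) [Decidable p] (b : Bool) : (if p then true else b) = (decide p || b) := by
  by_cases h : p <;> simp [h]

-- the matched condition, group by group
theorem pvAtom (ea eb : List String) (i : Nat) (hi : i < 6) (g : List String)
    (hg : ∀ e : String, pvGroupIndex.get? e = some (i : Int) ↔ e ∈ g) :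
    decide ((pvClassify ea).getD i [] ≠ [] ∧ (pvClassify eb).getD i [] ≠ [] ∧
            PySem.Set.equal ((pvClassify ea).getD i []) ((pvClassify eb).getD i []) = false)
      = decide (PySem.Set.inter ea g ≠ [] ∧ PySem.Set.inter eb g ≠ [] ∧
            PySem.Set.equal (PySem.Set.inter ea g) (PySem.Set.inter eb g) = false) :=
  pvCond_congr _ _ _ _ (pvBucket_vs_inter ea i hi g hg) (pvBucket_vs_inter eb i hi g hg)

-- ===== VERDICT (by name: the statement is the Claim_ definition above) =====
theorem check_disjoint_mismatch_py_spec : Claim_equal_check_disjoint_mismatch_py := by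
  intro ea eb _
  unfold Spec_check_disjoint_mismatch_py
  have hA : check_disjoint_mismatch_py ea eb =
      (decide (PySem.Set.inter ea pvG0 ≠ [] ∧ PySem.Set.inter eb pvG0 ≠ [] ∧ PySem.Set.equal (PySem.Set.inter ea pvG0) (PySem.Set.inter eb pvG0) = false) ||
       (decide (PySem.Set.inter ea pvG1 ≠ [] ∧ PySem.Set.inter eb pvG1 ≠ [] ∧ PySem.Set.equal (PySem.Set.inter ea pvG1) (PySem.Set.inter eb pvG1) = false) ||
       (decide (PySem.Set.inter ea pvG2 ≠ [] ∧ PySem.Set.inter eb pvG2 ≠ [] ∧ PySem.Set.equal (PySem.Set.inter ea pvG2) (PySem.Set.inter eb pvG2) = false) ||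
       (decide (PySem.Set.inter ea pvG3 ≠ [] ∧ PySem.Set.inter eb pvG3 ≠ [] ∧ PySem.Set.equal (PySem.Set.inter ea pvG3) (PySem.Set.inter eb pvG3) = false) ||
       (decide (PySem.Set.inter ea pvG5 ≠ [] ∧ PySem.Set.inter eb pvG5 ≠ [] ∧ PySem.Set.equal (PySem.Set.inter ea pvG5) (PySem.Set.inter eb pvG5) = false)))))) := by
    simp only [check_disjoint_mismatch_py, pvGroups, PySem.List.enumerate_cons,
      PySem.List.enumerate_nil, pvCheckA]
    norm_num [pvIfOr]
  rw [hA]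
  simp only [check_disjoint_mismatch_py_alt, List.any_cons, List.any_nil,
    pvAtom ea eb 0 (by norm_num) pvG0 pvIdx0,
    pvAtom ea eb 1 (by norm_num) pvG1 pvIdx1,
    pvAtom ea eb 2 (by norm_num) pvG2 pvIdx2,
    pvAtom ea eb 3 (by norm_num) pvG3 pvIdx3,
    pvAtom ea eb 5 (by norm_num) pvG5 pvIdx5,
    Bool.or_false]
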